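-- pv_equiv track=rewrite | github.com/pypi-data/pypi-mirror-45 | packages/mixemup/mixemup-0.3.0.tar.gz/mixemup-0.3.0/mixemup.py | combine_strings
-- ===== SOURCE A (Python) =====
-- import itertools
--
-- def combine_strings(strings, max_args=None):
--     """
--     Returns a generator for space-separated combinations of the strings from the input.
--     The parameter `strings` is an iterable/generator of strings.
--     The combinations range from length 0 to the number of items in `strings`.
--     """
--     strings_list = list(strings)
--     iterations = len(strings_list) + 1
--     if max_args is not None:
--         iterations = min(iterations, max_args + 1)
--
--     for i in range(iterations):
--         string_combinations = itertools.combinations(strings_list, i)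
--         for combination in string_combinations:
--             yield " ".join(combination)
-- ===== SOURCE B (Python) =====
-- def combine_strings(strings, max_args=None):
--     """
--     Generator of space-separated combinations: iterative level-by-level
--     dynamic programming. Each level holds (last_index, joined_string) pairs;
--     the next level extends each pair with every later index, building the
--     joined string incrementally (no itertools, no recursion, no per-item join).
--     """
--     strings_list = list(strings)
--     n = len(strings_list)
--     iterations = n + 1
--     if max_args is not None:
--         iterations = min(iterations, max_args + 1)
--
--     level = [(-1, "")]
--     k = 0
--     while k < iterations:
--         for _, s in level:
--             yield s
--         nxt = []
--         for last, s in level: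
--             for j in range(last + 1, n):
--                 nxt.append((j, strings_list[j] if k == 0 else s + " " + strings_list[j]))
--         level = nxt
--         k += 1
-- ===== Notes on version B (the rewrite author's own statement) =====
-- stated objective: alternative
-- what changed: Replaces the per-size itertools.combinations calls and per-combination joins by an iterative level-by-level dynamic programming loop that carries (last_index, joined_string) pairs and extends each pair with every later index, building the joined strings incrementally.
import Mathlib
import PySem

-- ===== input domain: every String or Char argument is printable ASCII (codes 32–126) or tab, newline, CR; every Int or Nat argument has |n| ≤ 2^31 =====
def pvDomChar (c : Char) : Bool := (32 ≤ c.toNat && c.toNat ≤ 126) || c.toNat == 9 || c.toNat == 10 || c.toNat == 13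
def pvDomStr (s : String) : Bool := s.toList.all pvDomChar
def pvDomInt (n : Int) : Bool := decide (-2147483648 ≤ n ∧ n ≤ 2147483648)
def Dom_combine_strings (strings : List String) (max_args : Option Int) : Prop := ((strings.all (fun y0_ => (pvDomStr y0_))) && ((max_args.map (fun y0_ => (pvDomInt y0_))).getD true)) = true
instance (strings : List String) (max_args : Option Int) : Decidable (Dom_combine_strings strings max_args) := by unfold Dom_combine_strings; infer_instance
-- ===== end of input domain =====

-- B replaces the per-size itertools.combinations calls and per-combination joins by an
-- iterative level-by-level loop over (last_index, joined_string) pairs that builds the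
-- joined strings incrementally (objective: alternative decomposition, same cost).

-- ===== PORT A =====
-- itertools.combinations(l, k) in list order (the library call A makes), size-k tuples
def combsA : Nat → List String → List (List String)
  | 0, _ => [[]]
  | _ + 1, [] => []
  | k + 1, x :: xs => (combsA k xs).map (fun c => x :: c) ++ combsA (k + 1) xs

def combine_strings (strings : List String) (max_args : Option Int) : List String :=
  let strings_list := strings
  let iterations : Int := (strings_list.length : Int) + 1
  let iterations : Int := match max_args with
    | some m => min iterations (m + 1)
    | none => iterations
  (PySem.List.pyRange 0 iterations 1).flatMap (fun i =>
    (combsA i.toNat strings_list).map (fun combination => PySem.Str.join " " combination))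

-- ===== PORT B =====
-- the inner two loops of Source B: extend each (last, s) pair of the current level by every
-- later index j, building the joined string incrementally (strings_list[j] at level 0)
def stepB (strings : List String) (k : Nat) (level : List (Int × String)) : List (Int × String) :=
  level.flatMap (fun p =>
    (PySem.List.pyRange (p.1 + 1) (strings.length : Int) 1).map (fun j =>
      (j, if k == 0 then PySem.List.pyGetD strings j ""
          else p.2 ++ " " ++ PySem.List.pyGetD strings j "")))

-- the 'while k < iterations' loop of Source B: yield the strings of the level, then advance
def loopB (strings : List String) : Nat → Nat → List (Int × String) → List String
  | 0, _, _ => []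
  | fuel + 1, k, level => level.map Prod.snd ++ loopB strings fuel (k + 1) (stepB strings k level)

def combine_strings_alt (strings : List String) (max_args : Option Int) : List String :=
  let strings_list := strings
  let n := strings_list.length
  let iterations : Int := (n : Int) + 1
  let iterations : Int := match max_args with
    | some m => min iterations (m + 1)
    | none => iterations
  loopB strings_list iterations.toNat 0 [(-1, "")]

-- ===== PRECONDITION & SPEC =====
def Spec_combine_strings (strings : List String) (max_args : Option Int) (out : List String) : Prop := out = combine_strings_alt strings max_args
instance (strings : List String) (max_args : Option Int) (out : List String) : Decidable (Spec_combine_strings strings max_args out) := by unfold Spec_combine_strings; infer_instance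

-- ===== CLAIM (what is proved, stated in full; the proofs are below) =====
def Claim_equal_combine_strings : Prop := ∀ (strings : List String) (max_args : Option Int), Dom_combine_strings strings max_args → Spec_combine_strings strings max_args (combine_strings strings max_args)

-- ===== LEMMAS AND PROOFS =====

-- ghost: lex-ordered k-combinations of indices from [s, n), built from the front
def combK (n : Int) : Nat → Int → List (List Int)
  | 0, _ => [[]]
  | k + 1, s => (PySem.List.pyRange s n 1).flatMap (fun j => (combK n k (j + 1)).map (j :: ·))

-- where the next chosen index would start: one past the last index, or s for the empty combo
def nextStart (s : Int) (c : List Int) : Int :=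
  match c.getLast? with
  | some j => j + 1
  | none => s

def entryB (strings : List String) (c : List Int) : Int × String :=
  (nextStart 0 c - 1, PySem.Str.join " " (c.map (fun j => PySem.List.pyGetD strings j "")))

theorem nextStart_cons (s j : Int) (c : List Int) : nextStart s (j :: c) = nextStart (j + 1) c := by
  unfold nextStart
  cases c with
  | nil => rfl
  | cons b t =>
    rw [List.getLast?_cons_cons]
    cases h : (b :: t).getLast? with
    | none => simp at h
    | some _ => rfl

theorem nextStart_concat (s j : Int) (c : List Int) : nextStart s (c ++ [j]) = j + 1 := by
  simp [nextStart]

theorem combK_length (n : Int) : ∀ (k : Nat) (s : Int) (c : List Int), c ∈ combK n k s → c.length = k := by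
  intro k
  induction k with
  | zero => intro s c hc; simp [combK] at hc; simp [hc]
  | succ k ih =>
    intro s c hc
    simp only [combK, List.mem_flatMap, List.mem_map] at hc
    obtain ⟨j, _, c', hc', rfl⟩ := hc
    simp [ih _ _ hc']

-- back-extension step: (k+1)-combinations are the k-combinations each extended at the tail
theorem combK_step (n : Int) : ∀ (k : Nat) (s : Int),
    combK n (k + 1) s = (combK n k s).flatMap (fun c =>
      (PySem.List.pyRange (nextStart s c) n 1).map (fun j => c ++ [j])) := by
  intro k
  induction k with
  | zero =>
    intro s
    simp [combK, nextStart, List.map_eq_flatMap]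
  | succ k ih =>
    intro s
    have lhs_eq : combK n (k + 1 + 1) s = (PySem.List.pyRange s n 1).flatMap (fun j =>
        ((combK n k (j + 1)).flatMap (fun c =>
          (PySem.List.pyRange (nextStart (j + 1) c) n 1).map (fun x => c ++ [x]))).map (j :: ·)) := by
      show (PySem.List.pyRange s n 1).flatMap (fun j => (combK n (k + 1) (j + 1)).map (j :: ·)) = _
      congr 1
      funext j
      rw [ih]
    rw [lhs_eq]
    show _ = ((PySem.List.pyRange s n 1).flatMap (fun j => (combK n k (j + 1)).map (j :: ·))).flatMap
      (fun c => (PySem.List.pyRange (nextStart s c) n 1).map (fun x => c ++ [x]))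
    rw [List.flatMap_assoc]
    apply List.flatMap_congr
    intro j _
    simp only [List.flatMap_map, List.map_flatMap, List.map_map]
    apply List.flatMap_congr
    intro c _
    simp [Function.comp, nextStart_cons]

-- A-side: combK mapped through indexing is exactly itertools.combinations of the suffix
theorem combK_eq_combsA (strings : List String) : ∀ (fuel k : Nat) (s : Nat),
    strings.length ≤ s + fuel →
    (combK (strings.length : Int) k (s : Int)).map
        (fun c => c.map (fun j => PySem.List.pyGetD strings j "")) =
      combsA k (strings.drop s) := by
  intro fuel
  induction fuel with
  | zero =>
    intro k s hs
    match k with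
    | 0 => simp [combK, combsA]
    | k + 1 =>
      have h1 : PySem.List.pyRange (s : Int) (strings.length : Int) 1 = [] :=
        PySem.List.pyRange_one_eq_nil (by omega)
      have h2 : strings.drop s = [] := List.drop_eq_nil_of_le (by omega)
      show ((PySem.List.pyRange (s : Int) (strings.length : Int) 1).flatMap _).map _ = _
      rw [h1, h2]
      rfl
  | succ fuel ih =>
    intro k s hs
    match k with
    | 0 => simp [combK, combsA]
    | k + 1 =>
      by_cases hlt : s < strings.length
      · have hcons : PySem.List.pyRange (s : Int) (strings.length : Int) 1
            = (s : Int) :: PySem.List.pyRange ((s : Int) + 1) (strings.length : Int) 1 :=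
          PySem.List.pyRange_one_cons (by omega)
        have hdrop : strings.drop s = strings[s]'(by omega) :: strings.drop (s + 1) :=
          (List.getElem_cons_drop (by omega)).symm
        have h1 : ((s : Int) + 1) = ((s + 1 : Nat) : Int) := by push_cast; ring
        have hget : PySem.List.pyGetD strings (s : Int) "" = strings[s]'(by omega) :=
          PySem.List.pyGetD_ofNat strings s "" (by omega)
        show ((PySem.List.pyRange (s : Int) (strings.length : Int) 1).flatMap
            (fun j => (combK (strings.length : Int) k (j + 1)).map (j :: ·))).map _ = _
        rw [hcons]
        simp only [List.flatMap_cons, List.map_append, List.map_map]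
        rw [hdrop]
        show _ ++ _ = (combsA k (strings.drop (s + 1))).map _ ++ combsA (k + 1) (strings.drop (s + 1))
        rw [← ih k (s + 1) (by omega), ← ih (k + 1) (s + 1) (by omega)]
        congr 1
        · rw [h1, List.map_map]
          apply List.map_congr_left
          intro c _
          simp [Function.comp, hget]
      · have h1 : PySem.List.pyRange (s : Int) (strings.length : Int) 1 = [] :=
          PySem.List.pyRange_one_eq_nil (by omega)
        have h2 : strings.drop s = [] := List.drop_eq_nil_of_le (by omega)
        show ((PySem.List.pyRange (s : Int) (strings.length : Int) 1).flatMap _).map _ = _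
        rw [h1, h2]
        rfl

theorem chars_join_append (sep x : List Char) : ∀ (l : List (List Char)), l ≠ [] →
    PySem.Chars.join sep (l ++ [x]) = PySem.Chars.join sep l ++ sep ++ x := by
  intro l
  induction l with
  | nil => intro h; exact absurd rfl h
  | cons a l ih =>
    intro _
    cases l with
    | nil => simp [PySem.Chars.join_cons_cons, PySem.Chars.join_singleton]
    | cons b t =>
      simp only [List.cons_append] at ih ⊢
      rw [PySem.Chars.join_cons_cons, ih (by simp), PySem.Chars.join_cons_cons]
      simp [List.append_assoc]

theorem join_append_singleton (sep x : String) (l : List String) (h : l ≠ []) :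
    PySem.Str.join sep (l ++ [x]) = PySem.Str.join sep l ++ sep ++ x := by
  apply String.toList_inj.mp
  simp only [PySem.Str.toList_join, String.toList_append, List.map_append, List.map_cons,
    List.map_nil]
  exact chars_join_append sep.toList x.toList (l.map String.toList) (by simpa using h)

theorem join_singleton' (x : String) : PySem.Str.join " " [x] = x := by
  apply String.toList_inj.mp
  simp [PySem.Str.join, PySem.Chars.join_singleton]

-- the level invariant: Source B's level k is combK's size-k combinations, tagged and joined
theorem stepB_levelB (strings : List String) (k : Nat) :
    stepB strings k ((combK (strings.length : Int) k 0).map (entryB strings)) =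
      (combK (strings.length : Int) (k + 1) 0).map (entryB strings) := by
  rw [combK_step (strings.length : Int) k 0]
  unfold stepB
  simp only [List.flatMap_map, List.map_flatMap, List.map_map]
  apply List.flatMap_congr
  intro c hc
  have hlen : c.length = k := combK_length _ k 0 c hc
  have hfst : (entryB strings c).1 + 1 = nextStart 0 c := by
    simp [entryB]
  rw [hfst]
  apply List.map_congr_left
  intro j _
  simp only [Function.comp]
  unfold entryB
  rw [nextStart_concat]
  match k, hlen with
  | 0, hlen =>
    have hc0 : c = [] := List.length_eq_zero_iff.mp hlen
    subst hc0
    simp [join_singleton']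
  | k + 1, hlen =>
    have hne : c.map (fun j => PySem.List.pyGetD strings j "") ≠ [] := by
      intro h
      rw [List.map_eq_nil_iff] at h
      subst h
      simp at hlen
    rw [if_neg (by simp)]
    simp only [List.map_append, List.map_cons, List.map_nil]
    rw [join_append_singleton " " (PySem.List.pyGetD strings j "")
      (c.map (fun j => PySem.List.pyGetD strings j "")) hne]
    simp

theorem loopB_eq (strings : List String) : ∀ (fuel k : Nat),
    loopB strings fuel k ((combK (strings.length : Int) k 0).map (entryB strings)) =
      (PySem.List.pyRange (k : Int) ((k : Int) + (fuel : Int)) 1).flatMap (fun i =>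
        (combsA i.toNat strings).map (fun combination => PySem.Str.join " " combination)) := by
  intro fuel
  induction fuel with
  | zero =>
    intro k
    rw [PySem.List.pyRange_one_eq_nil (by omega)]
    rfl
  | succ fuel ih =>
    intro k
    have hcons : PySem.List.pyRange (k : Int) ((k : Int) + ((fuel + 1 : Nat) : Int)) 1
        = (k : Int) :: PySem.List.pyRange ((k : Int) + 1) ((k : Int) + ((fuel + 1 : Nat) : Int)) 1 :=
      PySem.List.pyRange_one_cons (by push_cast; omega)
    rw [hcons]
    show (((combK (strings.length : Int) k 0).map (entryB strings)).map Prod.snd) ++ _ = _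
    rw [stepB_levelB]
    simp only [List.flatMap_cons]
    congr 1
    · simp only [Int.toNat_natCast]
      have hdz : strings.drop 0 = strings := List.drop_zero
      conv_rhs => rw [← hdz]
      rw [← combK_eq_combsA strings strings.length k 0 (by omega)]
      simp only [Nat.cast_zero, List.map_map]
      rfl
    · have h1 : ((k : Int) + 1) = ((k + 1 : Nat) : Int) := by push_cast; ring
      have h2 : ((k : Int) + ((fuel + 1 : Nat) : Int)) = ((k + 1 : Nat) : Int) + (fuel : Int) := by
        push_cast; ring
      rw [h1, h2]
      exact ih (k + 1)

theorem main_aux (strings : List String) (I : Int) :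
    (PySem.List.pyRange 0 I 1).flatMap (fun i =>
        (combsA i.toNat strings).map (fun combination => PySem.Str.join " " combination)) =
      loopB strings I.toNat 0 [((-1 : Int), "")] := by
  have hstart : ([((-1 : Int), "")] : List (Int × String))
      = (combK (strings.length : Int) 0 0).map (entryB strings) := by
    simp [combK, entryB, nextStart, PySem.Str.join]
  rw [hstart, loopB_eq strings I.toNat 0]
  by_cases h0 : 0 ≤ I
  · rw [show ((0 : Nat) : Int) = (0 : Int) from rfl, show (0 : Int) + (I.toNat : Int) = I by omega]
  · rw [PySem.List.pyRange_one_eq_nil (by omega), PySem.List.pyRange_one_eq_nil (by omega)]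

-- ===== VERDICT (by name: the statement is the Claim_ definition above) =====
theorem combine_strings_spec : Claim_equal_combine_strings := by
  intro strings max_args hd
  show combine_strings strings max_args = combine_strings_alt strings max_args
  unfold combine_strings combine_strings_alt
  exact main_aux strings _
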